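-- pv_equiv track=rewrite | github.com/EduardoIsaacC/Algoritmos_Enfoque_IA | 001_B_e_G/1.1.3_Algoritmos_Geneticos_Satisfaccion_De_Restricciones/018.BG_Busqueda_De_Vuelta_Atras.py | es_consistente
-- ===== SOURCE A (Python) =====
-- restricciones = [
--     ("A", "B"), ("A", "C"),
--     ("B", "C"), ("B", "D"),
--     ("C", "D")
-- ]
--
-- def es_consistente(asignacion, var, valor):
--     """
--     Comprueba que la variable actual no viole restricciones
--     con las variables ya asignadas.
--     """
--     for (x, y) in restricciones:
--         # Si la variable actual está relacionada con otra ya asignada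
--         if x == var and y in asignacion:
--             if asignacion[y] == valor:
--                 return False
--         if y == var and x in asignacion:
--             if asignacion[x] == valor:
--                 return False
--     return True
-- ===== SOURCE B (Python) =====
-- restricciones = [
--     ("A", "B"), ("A", "C"),
--     ("B", "C"), ("B", "D"),
--     ("C", "D")
-- ]
--
-- _ADJ = {}
-- for _x, _y in restricciones:
--     _ADJ.setdefault(_x, []).append(_y)
--     _ADJ.setdefault(_y, []).append(_x)
--
-- def es_consistente(asignacion, var, valor):
--     """Comprueba consistencia usando una lista de adyacencia precomputada."""
--     for vecino in _ADJ.get(var, ()):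
--         if vecino in asignacion and asignacion[vecino] == valor:
--             return False
--     return True
-- ===== Notes on version B (the rewrite author's own statement) =====
-- stated objective: alternative
-- what changed: B precomputes an adjacency map from the fixed edge list once and, per call, scans only var's neighbors in the assignment instead of scanning every edge and testing both endpoints.
import Mathlib
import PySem

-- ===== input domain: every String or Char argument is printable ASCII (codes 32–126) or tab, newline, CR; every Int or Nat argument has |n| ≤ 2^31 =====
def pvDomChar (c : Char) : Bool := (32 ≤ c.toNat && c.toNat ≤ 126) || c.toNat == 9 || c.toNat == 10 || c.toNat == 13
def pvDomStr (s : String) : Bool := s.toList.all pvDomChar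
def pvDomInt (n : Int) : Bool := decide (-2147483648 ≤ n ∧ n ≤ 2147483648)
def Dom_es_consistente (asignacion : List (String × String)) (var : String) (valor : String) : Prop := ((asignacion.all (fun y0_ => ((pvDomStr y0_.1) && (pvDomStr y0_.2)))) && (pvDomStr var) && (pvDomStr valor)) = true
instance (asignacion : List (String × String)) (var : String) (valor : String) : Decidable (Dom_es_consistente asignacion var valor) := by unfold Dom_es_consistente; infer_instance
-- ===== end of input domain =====

-- B replaces A's scan of the whole edge list (testing both endpoints of every edge)
-- by a precomputed adjacency map, scanning only var's neighbors; return value only, no mutation.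

-- ===== PORT A =====
def restricciones : List (String × String) :=
  [("A", "B"), ("A", "C"), ("B", "C"), ("B", "D"), ("C", "D")]

-- the 'for (x, y) in restricciones' loop with its early returns
def esLoopA (asig : PySem.Dict String String) (var valor : String) :
    List (String × String) → Bool
  | [] => true
  | (x, y) :: rest =>
    if x == var && asig.contains y && asig.get? y == some valor then false
    else if y == var && asig.contains x && asig.get? x == some valor then false
    else esLoopA asig var valor rest

def es_consistente (asignacion : List (String × String)) (var : String) (valor : String) : Bool :=
  esLoopA (PySem.Dict.mk asignacion) var valor restricciones

-- ===== PORT B =====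
-- the module-level precompute: _ADJ built once from restricciones (setdefault+append = modify with [] default)
def adjB : PySem.Dict String (List String) :=
  restricciones.foldl
    (fun d e => (d.modify e.1 [] (· ++ [e.2])).modify e.2 [] (· ++ [e.1]))
    PySem.Dict.empty

-- the 'for vecino in _ADJ.get(var, ())' loop
def esLoopB (asig : PySem.Dict String String) (valor : String) : List String → Bool
  | [] => true
  | n :: rest =>
    if asig.contains n && asig.get? n == some valor then false
    else esLoopB asig valor rest

def es_consistente_alt (asignacion : List (String × String)) (var : String) (valor : String) : Bool :=
  esLoopB (PySem.Dict.mk asignacion) valor (adjB.getD var [])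

-- ===== PRECONDITION & SPEC =====
def Spec_es_consistente (asignacion : List (String × String)) (var : String) (valor : String) (out : Bool) : Prop := out = es_consistente_alt asignacion var valor
instance (asignacion : List (String × String)) (var : String) (valor : String) (out : Bool) : Decidable (Spec_es_consistente asignacion var valor out) := by unfold Spec_es_consistente; infer_instance

-- ===== CLAIM (what is proved, stated in full; the proofs are below) =====
def Claim_equal_es_consistente : Prop := ∀ (asignacion : List (String × String)) (var : String) (valor : String), Dom_es_consistente asignacion var valor → Spec_es_consistente asignacion var valor (es_consistente asignacion var valor)

-- ===== LEMMAS AND PROOFS =====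

-- ===== VERDICT (by name: the statement is the Claim_ definition above) =====
theorem es_consistente_spec : Claim_equal_es_consistente := by
  intro asig var valor _
  unfold Spec_es_consistente es_consistente es_consistente_alt
  by_cases hA : var = "A"
  · subst hA; simp [restricciones, esLoopA, esLoopB, adjB, PySem.Dict.getD_modify]
  by_cases hB : var = "B"
  · subst hB; simp [restricciones, esLoopA, esLoopB, adjB, PySem.Dict.getD_modify]
  by_cases hC : var = "C"
  · subst hC; simp [restricciones, esLoopA, esLoopB, adjB, PySem.Dict.getD_modify]
  by_cases hD : var = "D"
  · subst hD; simp [restricciones, esLoopA, esLoopB, adjB, PySem.Dict.getD_modify]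
  · simp [restricciones, esLoopA, esLoopB, adjB, PySem.Dict.getD_modify,
      beq_iff_eq, Ne.symm hA, Ne.symm hB, Ne.symm hC, Ne.symm hD, hA, hB, hC, hD]
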